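-- pv_equiv track=rewrite | github.com/yuhyunjeong/python_algorithm_study | yuda/programmers_mock_test/0725_03.py | solution
-- ===== SOURCE A (Python) =====
-- def solution(order):
--     answer = 0
--     main_stack = [i for i in range(1, len(order) + 1)]
--     sub_stack = []
--     while True:
--         if len(sub_stack) > 0 and sub_stack[-1] == order[0]:
--             del sub_stack[-1]
--             del order[0]
--             answer += 1
--         elif len(main_stack) > 0:
--             if main_stack[0] == order[0]:
--                 del main_stack[0]
--                 del order[0]
--                 answer += 1
--             elif main_stack.count(order[0]) == 1:
--                 sub_stack.extend(main_stack[0:main_stack.index(order[0])])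
--                 del main_stack[0:main_stack.index(order[0])]
--             else:
--                 break
--         else:
--             break
--     return answer
-- ===== SOURCE B (Python) =====
-- def solution(order):
--     # No auxiliary stack at all: the stack in the naive simulation always holds
--     # exactly the not-yet-loaded box numbers <= hi (the largest box taken from
--     # the belt so far), in increasing order, so its top is the largest unloaded
--     # box <= hi.  Track loaded boxes in a set and recover that top with a
--     # lazily decreasing pointer (amortized O(1) per step).
--     n = len(order)
--     loaded = set()
--     hi = 0      # largest box number taken from the belt so far
--     top = 0     # lazy upper bound for the largest unloaded box <= hi
--     cnt = 0
--     for w in order: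
--         if w < 1 or w > n:
--             break
--         if w > hi:
--             hi = w
--             top = w - 1
--         else:
--             while top in loaded:
--                 top -= 1
--             if top != w:
--                 break
--         loaded.add(w)
--         cnt += 1
--     return cnt
-- ===== Notes on version B (the rewrite author's own statement) =====
-- stated objective: faster
-- what changed: B removes the auxiliary stack and belt simulation entirely: it keeps a set of already-loaded boxes plus a max-so-far and a lazily decreasing pointer that recovers the largest unloaded box, one pass over order with amortized O(1) steps instead of A's repeated list.count/.index scans and front deletions.
import Mathlib
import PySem

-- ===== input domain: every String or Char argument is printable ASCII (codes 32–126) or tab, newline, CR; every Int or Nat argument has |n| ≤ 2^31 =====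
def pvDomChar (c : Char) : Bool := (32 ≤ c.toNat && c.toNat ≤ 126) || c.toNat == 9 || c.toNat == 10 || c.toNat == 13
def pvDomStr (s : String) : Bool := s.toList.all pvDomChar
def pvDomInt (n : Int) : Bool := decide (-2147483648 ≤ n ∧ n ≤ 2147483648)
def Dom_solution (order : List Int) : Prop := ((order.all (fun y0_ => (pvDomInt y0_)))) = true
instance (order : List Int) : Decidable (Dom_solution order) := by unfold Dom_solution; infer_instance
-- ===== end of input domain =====

-- B drops A's quadratic belt simulation (auxiliary stack, list.count/.index/del on the
-- front) entirely: it keeps a set of loaded boxes and a lazily decreasing pointer for the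
-- largest unloaded box; equivalence is about the RETURN value only (Python A destructively
-- consumes its `order` argument, B does not).

-- ===== PORT A =====
-- A's while-loop state: (answer, main_stack, sub_stack, order).  Where Python would
-- evaluate order[0] with order == [] it raises IndexError; those states are unreachable
-- from solution's initial call (main+sub stay as long as order), the port returns answer.
def solLoopA (answer : Int) (main sub order : List Int) : Int :=
  -- if len(sub_stack) > 0 and sub_stack[-1] == order[0]
  if h1 : 0 < sub.length ∧ sub.getLast? = order.head? then
    solLoopA (answer + 1) main sub.dropLast order.tail
  else if 0 < main.length then
    match main, order with
    | m :: ms, w :: rest =>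
      if m = w then
        solLoopA (answer + 1) ms sub rest
      else if PySem.List.count (m :: ms) w = 1 then
        match h2 : PySem.List.index? (m :: ms) w with
        | some i =>
            -- sub_stack.extend(main_stack[0:i]); del main_stack[0:i]
            solLoopA answer (PySem.List.slice (m :: ms) (some (i : Int)) none)
              (sub ++ PySem.List.slice (m :: ms) (some 0) (some (i : Int))) (w :: rest)
        | none => answer   -- unreachable: count = 1 means w ∈ main (Python .index would raise)
      else answer
    | _, _ => answer   -- order == []: unreachable from the initial call (Python would raise)
  else answer
termination_by order.length + main.length
decreasing_by
  · have hs : sub ≠ [] := by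
      intro h; subst h; simp at h1
    have : order ≠ [] := by
      intro h; subst h
      rcases h1 with ⟨-, heq⟩
      rw [List.head?_nil] at heq
      exact hs (List.getLast?_eq_none_iff.mp heq)
    cases order with
    | nil => exact absurd rfl this
    | cons a t => simp
  · simp; omega
  · rename_i hmw _
    have : ∃ j, i = j + 1 := by
      rw [PySem.List.index?_cons_of_ne ms hmw] at h2
      rcases Option.map_eq_some_iff.mp h2 with ⟨j, _, hj⟩
      exact ⟨j, hj.symm⟩
    rcases this with ⟨j, rfl⟩
    rw [PySem.List.slice_from_natCast]
    simp only [List.length_cons, List.length_drop]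
    omega

def solution (order : List Int) : Int :=
  solLoopA 0 (PySem.List.pyRange 1 ((order.length : Int) + 1) 1) [] order

-- ===== PORT B =====
-- Source B's inner `while top in loaded: top -= 1` (the `0 < top` guard only makes the
-- recursion total; loaded never contains values < 1, where Python's loop also stops).
def findTop (loaded : PySem.Set Int) (top : Int) : Int :=
  if h : PySem.Set.contains loaded top = true ∧ 0 < top then findTop loaded (top - 1)
  else top
termination_by top.toNat
decreasing_by omega

-- Source B's for-loop: loaded set, hi = largest box taken so far, lazy pointer top, counter.
def solLoopB (n : Int) (loaded : PySem.Set Int) (hi top cnt : Int) (order : List Int) : Int :=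
  match order with
  | [] => cnt
  | w :: rest =>
    if w < 1 ∨ n < w then cnt
    else if hi < w then
      solLoopB n (PySem.Set.add loaded w) w (w - 1) (cnt + 1) rest
    else
      let t := findTop loaded top
      if t = w then solLoopB n (PySem.Set.add loaded w) hi t (cnt + 1) rest
      else cnt

def solution_alt (order : List Int) : Int :=
  solLoopB (order.length : Int) PySem.Set.empty 0 0 0 order

-- ===== PRECONDITION & SPEC =====
def Spec_solution (order : List Int) (out : Int) : Prop := out = solution_alt order
instance (order : List Int) (out : Int) : Decidable (Spec_solution order out) := by unfold Spec_solution; infer_instance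

-- ===== CLAIM (what is proved, stated in full; the proofs are below) =====
def Claim_equal_solution : Prop := ∀ (order : List Int), Dom_solution order → Spec_solution order (solution order)


-- ===== LEMMAS AND PROOFS =====

-- Proof-internal intermediate program: the one-pass STACK simulation (a real stack of the
-- boxes moved aside, `nxt` = next box on the belt).  A's loop is proved equal to it, and
-- it in turn equal to B's set+pointer loop.
def solLoopS (n : Int) (stack : List Int) (loaded nxt : Int) (order : List Int) : Int :=
  match order with
  | [] => loaded
  | want :: rest =>
    if 0 < stack.length ∧ stack.getLast? = some want then
      solLoopS n stack.dropLast (loaded + 1) nxt rest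
    else if nxt ≤ want ∧ want ≤ n then
      solLoopS n (stack ++ PySem.List.pyRange nxt want 1) (loaded + 1) (want + 1) rest
    else loaded

-- pyRange a b 1 has no duplicates, so Python's .count is 0/1 on the main belt
theorem pvRangeCountOne {a b w : Int} (h1 : a ≤ w) (h2 : w < b) :
    PySem.List.count (PySem.List.pyRange a b 1) w = 1 := by
  rw [PySem.List.count_eq]
  exact List.count_eq_one_of_mem (PySem.List.nodup_pyRange_one a b)
    ((PySem.List.mem_pyRange_one).mpr ⟨h1, h2⟩)

theorem pvRangeCountZero {a b w : Int} (h : ¬ (a ≤ w ∧ w < b)) :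
    PySem.List.count (PySem.List.pyRange a b 1) w = 0 := by
  rw [PySem.List.count_eq, List.count_eq_zero]
  intro hm; exact h ((PySem.List.mem_pyRange_one).mp hm)

theorem pvRangeIndex {a b w : Int} (h1 : a ≤ w) (h2 : w < b) :
    PySem.List.index? (PySem.List.pyRange a b 1) w = some (w - a).toNat := by
  rw [PySem.List.index?_eq_some_iff]
  refine ⟨PySem.List.pyRange a w 1, PySem.List.pyRange (w + 1) b 1, ?_, ?_, ?_⟩
  · rw [PySem.List.pyRange_one_append a w b h1 (by omega),
      PySem.List.pyRange_one_cons (a := w) (b := b) h2]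
  · simp [PySem.List.length_pyRange_one]
  · intro hm; have := (PySem.List.mem_pyRange_one).mp hm; omega

theorem pvRangeGetLast {a b : Int} (h : a < b) :
    (PySem.List.pyRange a b 1).getLast? = some (b - 1) := by
  have h2 := PySem.List.pyRange_one_succ_right (a := a) (b := b - 1) (by omega)
  have h3 : b - 1 + 1 = b := by omega
  rw [h3] at h2
  rw [h2]
  simp

theorem pvAppendRangeGetLast (s : List Int) {a b : Int} (h : a < b) :
    (s ++ PySem.List.pyRange a b 1).getLast? = some (b - 1) := by
  rw [List.getLast?_append, pvRangeGetLast h]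
  rfl

theorem pvRangeDrop {a b w : Int} (h1 : a ≤ w) (h2 : w ≤ b) :
    (PySem.List.pyRange a b 1).drop (w - a).toNat = PySem.List.pyRange w b 1 := by
  rw [PySem.List.pyRange_one_append a w b h1 h2, List.drop_left']
  simp [PySem.List.length_pyRange_one]

theorem pvRangeTake {a b w : Int} (h1 : a ≤ w) (h2 : w ≤ b) :
    (PySem.List.pyRange a b 1).take (w - a).toNat = PySem.List.pyRange a w 1 := by
  rw [PySem.List.pyRange_one_append a w b h1 h2, List.take_left']
  simp [PySem.List.length_pyRange_one]

-- one-step unfoldings of A's loop (the match in solLoopA reduced by hand)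
theorem solLoopA_nil (answer : Int) (main sub : List Int) :
    solLoopA answer main sub [] = answer := by
  rw [solLoopA.eq_def]
  have h1 : ¬ (0 < sub.length ∧ sub.getLast? = ([] : List Int).head?) := by
    rintro ⟨hl, he⟩
    rw [List.head?_nil, List.getLast?_eq_none_iff] at he
    simp [he] at hl
  rw [dif_neg h1]
  cases main with
  | nil => simp
  | cons m ms =>
    rw [if_pos (by simp)]

theorem solLoopA_step_sub (answer : Int) (main sub order : List Int)
    (h1 : 0 < sub.length ∧ sub.getLast? = order.head?) :
    solLoopA answer main sub order = solLoopA (answer + 1) main sub.dropLast order.tail := by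
  rw [solLoopA.eq_def, dif_pos h1]

theorem solLoopA_step_take (answer m w : Int) (ms sub rest : List Int)
    (h1 : ¬ (0 < sub.length ∧ sub.getLast? = some w)) (hm : m = w) :
    solLoopA answer (m :: ms) sub (w :: rest) = solLoopA (answer + 1) ms sub rest := by
  rw [solLoopA.eq_def, dif_neg (by simpa using h1), if_pos (by simp)]
  split
  · rename_i heqM heqO heqH
    injection heqM with e1 e2
    injection heqO with e3 e4
    subst e1; subst e2; subst e3; subst e4
    rw [if_pos hm]
  · rename_i hno
    exact (hno m ms w rest _ rfl rfl HEq.rfl).elim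

theorem solLoopA_step_move (answer m w : Int) (ms sub rest : List Int) (k : Nat)
    (h1 : ¬ (0 < sub.length ∧ sub.getLast? = some w)) (hm : ¬ m = w)
    (hc : PySem.List.count (m :: ms) w = 1)
    (hidx : PySem.List.index? (m :: ms) w = some k) :
    solLoopA answer (m :: ms) sub (w :: rest)
      = solLoopA answer (PySem.List.slice (m :: ms) (some (k : Int)) none)
          (sub ++ PySem.List.slice (m :: ms) (some 0) (some (k : Int))) (w :: rest) := by
  rw [solLoopA.eq_def, dif_neg (by simpa using h1), if_pos (by simp)]
  split
  · rename_i heqM heqO heqH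
    injection heqM with e1 e2
    injection heqO with e3 e4
    subst e1; subst e2; subst e3; subst e4
    rw [if_neg hm, if_pos hc]
    split
    · rename_i i h2
      rw [hidx] at h2
      injection h2 with h2
      subst h2
      rfl
    · rename_i h2
      rw [hidx] at h2
      cases h2
  · rename_i hno
    exact (hno m ms w rest _ rfl rfl HEq.rfl).elim

theorem solLoopA_step_break (answer m w : Int) (ms sub rest : List Int)
    (h1 : ¬ (0 < sub.length ∧ sub.getLast? = some w)) (hm : ¬ m = w)
    (hc : ¬ PySem.List.count (m :: ms) w = 1) :
    solLoopA answer (m :: ms) sub (w :: rest) = answer := by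
  rw [solLoopA.eq_def, dif_neg (by simpa using h1), if_pos (by simp)]
  split
  · rename_i heqM heqO heqH
    injection heqM with e1 e2
    injection heqO with e3 e4
    subst e1; subst e2; subst e3; subst e4
    rw [if_neg hm, if_neg hc]
  · rename_i hno
    exact (hno m ms w rest _ rfl rfl HEq.rfl).elim

-- First half: A's main_stack is always the contiguous run nxt..n; under that shape
-- A's whole while-loop computes exactly the stack-simulation loop solLoopS.
theorem loopA_eq_loopS (order : List Int) : ∀ (sub : List Int) (answer nxt n : Int),
    solLoopA answer (PySem.List.pyRange nxt (n + 1) 1) sub order = solLoopS n sub answer nxt order := by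
  induction order with
  | nil =>
    intro sub answer nxt n
    rw [solLoopA_nil]
    simp only [solLoopS]
  | cons w rest ih =>
    intro sub answer nxt n
    simp only [solLoopS]
    by_cases h1 : 0 < sub.length ∧ sub.getLast? = some w
    · rw [solLoopA_step_sub answer _ sub (w :: rest) (by simpa using h1)]
      rw [if_pos h1]
      simpa using ih sub.dropLast (answer + 1) nxt n
    · rw [if_neg h1]
      by_cases hn : nxt ≤ n
      · have hR : PySem.List.pyRange nxt (n + 1) 1
            = nxt :: PySem.List.pyRange (nxt + 1) (n + 1) 1 :=
          PySem.List.pyRange_one_cons (a := nxt) (b := n + 1) (by omega)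
        by_cases hw : nxt = w
        · subst hw
          rw [hR, solLoopA_step_take answer nxt nxt _ sub rest h1 rfl]
          rw [if_pos (show nxt ≤ nxt ∧ nxt ≤ n from ⟨le_rfl, hn⟩)]
          rw [PySem.List.pyRange_one_eq_nil (le_refl nxt), List.append_nil]
          exact ih sub (answer + 1) (nxt + 1) n
        · by_cases hwin : nxt ≤ w ∧ w ≤ n
          · have hlt : nxt < w := lt_of_le_of_ne hwin.1 hw
            have hc : PySem.List.count (nxt :: PySem.List.pyRange (nxt + 1) (n + 1) 1) w = 1 := by
              rw [← hR]; exact pvRangeCountOne (by omega) (by omega)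
            have hidx : PySem.List.index? (nxt :: PySem.List.pyRange (nxt + 1) (n + 1) 1) w
                = some (w - nxt).toNat := by
              rw [← hR]; exact pvRangeIndex (by omega) (by omega)
            rw [hR, solLoopA_step_move answer nxt w _ sub rest (w - nxt).toNat h1 hw hc hidx]
            rw [← hR]
            have hdrop : PySem.List.slice (PySem.List.pyRange nxt (n + 1) 1)
                (some ((w - nxt).toNat : Int)) none = PySem.List.pyRange w (n + 1) 1 := by
              rw [PySem.List.slice_from_natCast, pvRangeDrop (by omega) (by omega)]
            have htake : PySem.List.slice (PySem.List.pyRange nxt (n + 1) 1)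
                (some 0) (some ((w - nxt).toNat : Int)) = PySem.List.pyRange nxt w 1 := by
              rw [PySem.List.slice_zero_start, PySem.List.slice_to_natCast,
                pvRangeTake (by omega) (by omega)]
            rw [hdrop, htake]
            have h1' : ¬ (0 < (sub ++ PySem.List.pyRange nxt w 1).length ∧
                (sub ++ PySem.List.pyRange nxt w 1).getLast? = some w) := by
              rintro ⟨_, he⟩
              rw [pvAppendRangeGetLast sub hlt] at he
              injection he with he
              omega
            have hR2 : PySem.List.pyRange w (n + 1) 1
                = w :: PySem.List.pyRange (w + 1) (n + 1) 1 :=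
              PySem.List.pyRange_one_cons (a := w) (b := n + 1) (by omega)
            rw [hR2, solLoopA_step_take answer w w _ (sub ++ PySem.List.pyRange nxt w 1) rest h1' rfl]
            rw [if_pos hwin]
            exact ih (sub ++ PySem.List.pyRange nxt w 1) (answer + 1) (w + 1) n
          · have hc : ¬ PySem.List.count (nxt :: PySem.List.pyRange (nxt + 1) (n + 1) 1) w = 1 := by
              rw [← hR, pvRangeCountZero (by omega)]
              decide
            rw [hR, solLoopA_step_break answer nxt w _ sub rest h1 hw hc, if_neg hwin]
      · have hnil : PySem.List.pyRange nxt (n + 1) 1 = [] :=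
          PySem.List.pyRange_one_eq_nil (by omega)
        rw [hnil, solLoopA.eq_def, dif_neg (by simpa using h1), if_neg (by simp),
          if_neg (show ¬ (nxt ≤ w ∧ w ≤ n) by omega)]

-- ---- Second half: the stack loop equals B's set + lazy-pointer loop ----

-- relation between the stack state and B's (loaded, hi, top) state
def pvInv (n : Int) (stack : List Int) (L : PySem.Set Int) (hi top : Int) : Prop :=
  0 ≤ hi ∧ hi ≤ n ∧ 0 ≤ top ∧ top ≤ hi ∧
  (∀ v ∈ L, 1 ≤ v ∧ v ≤ hi) ∧
  (∀ v : Int, v ∈ stack ↔ (1 ≤ v ∧ v ≤ hi ∧ v ∉ L)) ∧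
  stack.Pairwise (· < ·) ∧
  (∀ v : Int, top < v → v ≤ hi → v ∈ L)

-- findTop returns g when g is the largest value ≤ top outside L
theorem findTop_eq (L : PySem.Set Int) (g : Int) (hg0 : 0 ≤ g) (hgL : g ∉ L) :
    ∀ (top : Int), g ≤ top → (∀ u : Int, g < u → u ≤ top → u ∈ L) → findTop L top = g := by
  have key : ∀ k : Nat, ∀ top : Int, (top - g).toNat = k → g ≤ top →
      (∀ u : Int, g < u → u ≤ top → u ∈ L) → findTop L top = g := by
    intro k
    induction k with
    | zero =>
      intro top hk hle _
      have he : top = g := by omega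
      subst he
      rw [findTop, dif_neg]
      rintro ⟨hc, -⟩
      exact hgL ((PySem.Set.contains_iff _ _).mp hc)
    | succ k ih =>
      intro top hk hle hall
      have hlt : g < top := by omega
      have htL : top ∈ L := hall top hlt le_rfl
      rw [findTop, dif_pos ⟨(PySem.Set.contains_iff _ _).mpr htL, by omega⟩]
      exact ih (top - 1) (by omega) (by omega) (fun u hu1 hu2 => hall u hu1 (by omega))
  intro top h1 h2; exact key (top - g).toNat top rfl h1 h2

-- max of a strictly increasing list is its last element
theorem pvSortedLastMax : ∀ (l : List Int), l.Pairwise (· < ·) →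
    ∀ g, l.getLast? = some g → ∀ v ∈ l, v ≤ g := by
  intro l
  induction l with
  | nil => intro _ g hg; cases hg
  | cons a t ih =>
    intro hp g hg v hv
    cases t with
    | nil =>
      simp at hg hv
      omega
    | cons b t2 =>
      rw [List.getLast?_cons_cons] at hg
      have hgm : g ∈ b :: t2 := List.mem_of_getLast? hg
      rcases List.mem_cons.mp hv with rfl | hv2
      · have := (List.pairwise_cons.mp hp).1 g hgm
        omega
      · exact ih (List.pairwise_cons.mp hp).2 g hg v hv2

-- under the invariant, the stack's top is what the lazy pointer finds
theorem pvLastEq (L : PySem.Set Int) (stack : List Int) (hi top : Int)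
    (htop0 : 0 ≤ top) (htophi : top ≤ hi)
    (hmem : ∀ v : Int, v ∈ stack ↔ (1 ≤ v ∧ v ≤ hi ∧ v ∉ L))
    (hsort : stack.Pairwise (· < ·)) (htopL : ∀ v : Int, top < v → v ≤ hi → v ∈ L)
    (hne : stack ≠ []) : stack.getLast? = some (findTop L top) := by
  obtain ⟨g, hg⟩ : ∃ g, stack.getLast? = some g := by
    cases h : stack.getLast? with
    | none => exact absurd (List.getLast?_eq_none_iff.mp h) hne
    | some g => exact ⟨g, rfl⟩
  obtain ⟨hg1, hghi, hgL⟩ := (hmem g).mp (List.mem_of_getLast? hg)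
  have hgtop : g ≤ top := by
    by_contra h
    exact hgL (htopL g (by omega) hghi)
  have hfe : findTop L top = g := by
    apply findTop_eq L g (by omega) hgL top hgtop
    intro u hu1 hu2
    by_contra huL
    have hus : u ∈ stack := (hmem u).mpr ⟨by omega, by omega, huL⟩
    have := pvSortedLastMax stack hsort g hg u hus
    omega
  rw [hfe, hg]

-- under the invariant with an empty stack, the lazy pointer runs down to 0
theorem pvEmptyTop (L : PySem.Set Int) (hi top : Int)
    (htop0 : 0 ≤ top) (htophi : top ≤ hi) (hLb : ∀ v ∈ L, 1 ≤ v ∧ v ≤ hi)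
    (hmem : ∀ v : Int, v ∈ ([] : List Int) ↔ (1 ≤ v ∧ v ≤ hi ∧ v ∉ L)) :
    findTop L top = 0 := by
  apply findTop_eq L 0 le_rfl (fun h0 => by have := hLb 0 h0; omega) top htop0
  intro u hu1 hu2
  by_contra huL
  simpa using (hmem u).mpr ⟨by omega, by omega, huL⟩

theorem loopS_eq_loopB (n : Int) : ∀ (order stack : List Int) (L : PySem.Set Int)
    (hi top cnt : Int), pvInv n stack L hi top →
    solLoopS n stack cnt (hi + 1) order = solLoopB n L hi top cnt order := by
  intro order
  induction order with
  | nil => intro stack L hi top cnt _; simp only [solLoopS, solLoopB]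
  | cons w rest ih =>
    intro stack L hi top cnt hInv
    obtain ⟨hhi0, hhin, htop0, htophi, hLb, hmem, hsort, htopL⟩ := hInv
    simp only [solLoopS, solLoopB]
    by_cases hout : w < 1 ∨ n < w
    · rw [if_pos hout]
      have hc1 : ¬ (0 < stack.length ∧ stack.getLast? = some w) := by
        rintro ⟨-, hlast⟩
        have hw := (hmem w).mp (List.mem_of_getLast? hlast)
        omega
      rw [if_neg hc1, if_neg (show ¬ (hi + 1 ≤ w ∧ w ≤ n) by omega)]
    · rw [if_neg hout]
      push_neg at hout
      by_cases hgt : hi < w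
      · rw [if_pos hgt]
        have hc1 : ¬ (0 < stack.length ∧ stack.getLast? = some w) := by
          rintro ⟨-, hlast⟩
          have hw := (hmem w).mp (List.mem_of_getLast? hlast)
          omega
        rw [if_neg hc1, if_pos (show hi + 1 ≤ w ∧ w ≤ n by omega)]
        have hInv' : pvInv n (stack ++ PySem.List.pyRange (hi + 1) w 1)
            (PySem.Set.add L w) w (w - 1) := by
          refine ⟨by omega, by omega, by omega, by omega, ?_, ?_, ?_, ?_⟩
          · intro v hv
            rcases (PySem.Set.mem_add _ _ _).mp hv with h | rfl
            · have := hLb v h; omega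
            · omega
          · intro v
            rw [List.mem_append, PySem.List.mem_pyRange_one, hmem v]
            constructor
            · rintro (⟨h1, h2, h3⟩ | ⟨h1, h2⟩)
              · refine ⟨by omega, by omega, fun hv => ?_⟩
                rcases (PySem.Set.mem_add _ _ _).mp hv with h | rfl
                · exact h3 h
                · omega
              · refine ⟨by omega, by omega, fun hv => ?_⟩
                rcases (PySem.Set.mem_add _ _ _).mp hv with h | rfl
                · have := hLb v h; omega
                · omega
            · rintro ⟨h1, h2, h3⟩
              have hvL : v ∉ L := fun h => h3 ((PySem.Set.mem_add _ _ _).mpr (Or.inl h))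
              have hvw : v ≠ w := fun h => h3 ((PySem.Set.mem_add _ _ _).mpr (Or.inr h))
              by_cases hvhi : v ≤ hi
              · exact Or.inl ⟨h1, hvhi, hvL⟩
              · exact Or.inr ⟨by omega, by omega⟩
          · rw [List.pairwise_append]
            refine ⟨hsort, PySem.List.pairwise_lt_pyRange_one _ _, ?_⟩
            intro a ha b hb
            have h1 := (hmem a).mp ha
            have h2 := (PySem.List.mem_pyRange_one).mp hb
            omega
          · intro v h1 h2
            exact (PySem.Set.mem_add _ _ _).mpr (Or.inr (by omega))
        exact ih (stack ++ PySem.List.pyRange (hi + 1) w 1) (PySem.Set.add L w) w (w - 1)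
          (cnt + 1) hInv'
      · rw [if_neg hgt]
        by_cases hstack : stack = []
        · subst hstack
          have ht0 : findTop L top = 0 := pvEmptyTop L hi top htop0 htophi hLb hmem
          rw [ht0, if_neg (show ¬ ((0 : Int) = w) by omega),
            if_neg (show ¬ (0 < ([] : List Int).length ∧ ([] : List Int).getLast? = some w) by simp),
            if_neg (show ¬ (hi + 1 ≤ w ∧ w ≤ n) by omega)]
        · have hlast : stack.getLast? = some (findTop L top) :=
            pvLastEq L stack hi top htop0 htophi hmem hsort htopL hstack
          by_cases htw : findTop L top = w
          · rw [htw] at hlast ⊢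
            rw [if_pos rfl,
              if_pos ⟨List.length_pos_iff.mpr hstack, hlast⟩]
            have hlastw : stack.getLast? = some w := hlast
            have hl' : stack = stack.dropLast ++ [w] := by
              have hcat := List.dropLast_concat_getLast hstack
              rw [List.getLast?_eq_some_getLast hstack] at hlastw
              injection hlastw with he
              rw [← he]; exact hcat.symm
            have hdrop : ∀ v : Int, v ∈ stack.dropLast ↔ v ∈ stack ∧ v ≠ w := by
              intro v
              constructor
              · intro hv
                refine ⟨by rw [hl']; exact List.mem_append.mpr (Or.inl hv), ?_⟩
                have hps : (stack.dropLast ++ [w]).Pairwise (· < ·) := by rw [← hl']; exact hsort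
                have := (List.pairwise_append.mp hps).2.2 v hv w (by simp)
                omega
              · rintro ⟨hv, hvw⟩
                rw [hl'] at hv
                rcases List.mem_append.mp hv with h | h
                · exact h
                · simp at h; omega
            have hInv' : pvInv n stack.dropLast (PySem.Set.add L w) hi w := by
              refine ⟨hhi0, hhin, by omega, by omega, ?_, ?_, ?_, ?_⟩
              · intro v hv
                rcases (PySem.Set.mem_add _ _ _).mp hv with h | rfl
                · exact hLb v h
                · omega
              · intro v
                rw [hdrop v, hmem v]
                constructor
                · rintro ⟨⟨h1, h2, h3⟩, h4⟩
                  refine ⟨h1, h2, fun hv => ?_⟩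
                  rcases (PySem.Set.mem_add _ _ _).mp hv with h | rfl
                  · exact h3 h
                  · exact h4 rfl
                · rintro ⟨h1, h2, h3⟩
                  have hvL : v ∉ L := fun h => h3 ((PySem.Set.mem_add _ _ _).mpr (Or.inl h))
                  have hvw : v ≠ w := fun h => h3 ((PySem.Set.mem_add _ _ _).mpr (Or.inr h))
                  exact ⟨⟨h1, h2, hvL⟩, hvw⟩
              · exact hsort.sublist (List.dropLast_sublist stack)
              · intro v h1 h2
                by_cases hv : v ≤ top
                · have hvs : v ∉ stack := fun hs => by
                    have := pvSortedLastMax stack hsort w hlastw v hs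
                    omega
                  have : v ∈ L := by
                    by_contra hL
                    exact hvs ((hmem v).mpr ⟨by omega, h2, hL⟩)
                  exact (PySem.Set.mem_add _ _ _).mpr (Or.inl this)
                · exact (PySem.Set.mem_add _ _ _).mpr (Or.inl (htopL v (by omega) h2))
            exact ih stack.dropLast (PySem.Set.add L w) hi w (cnt + 1) hInv'
          · rw [if_neg htw]
            have hc1 : ¬ (0 < stack.length ∧ stack.getLast? = some w) := by
              rintro ⟨-, hl⟩
              rw [hlast] at hl
              injection hl with hl
              exact htw hl
            rw [if_neg hc1, if_neg (show ¬ (hi + 1 ≤ w ∧ w ≤ n) by omega)]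

-- ===== VERDICT (by name: the statement is the Claim_ definition above) =====
theorem solution_spec : Claim_equal_solution := by
  intro order _
  unfold Spec_solution solution solution_alt
  rw [loopA_eq_loopS order [] 0 1 (order.length : Int)]
  have h0 : (1 : Int) = 0 + 1 := by omega
  rw [h0]
  refine loopS_eq_loopB (order.length : Int) order [] PySem.Set.empty 0 0 0
    ⟨le_rfl, Int.natCast_nonneg _, le_rfl, le_rfl, ?_, ?_, List.Pairwise.nil, ?_⟩
  · intro v hv; simp [PySem.Set.empty] at hv
  · intro v; simp [PySem.Set.empty]; omega
  · intro v h1 h2; exact absurd h2 (by omega)
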